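-- pv_equiv track=rewrite | github.com/Course-Path-UIUC/Course-Path-UIUC.github.io | build_json.py | reduce_prerequisites_to_one_course
-- ===== SOURCE A (Python) =====
-- def reduce_prerequisites_to_one_course(prerequisites):
--     '''
--     Iterates through each list in the prerequisites list and reduces it to the most representative course
--     or group name. This will simplify the topological sorting and make it cleaner.
--
--     Parameters:
--         prerequisites(list): A list containing other lists (sublists) with each sublist being all the options of courses
--                              that can satisfy the prerequisite.
--
--     Returns:
--         prerequisites(list): The same list with the simplified version of rerequisites
--
--     Example:
--         >>> reduce_prerequisites_to_one_course([['CS 101', 'CS 125'], ['CS 361', 'STAT 400'], ['CS 446']])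
--         [['Intro to CS I'], ['Probability & Statistics'], ['CS 446']]
--
--     '''
--     # Reduce to one course.
--     for i, prerequisite in enumerate(prerequisites):
--         if 'MATH 220' in prerequisite:
--             prerequisites[i] = ['Calculus I']
--         elif ('STAT 400' in prerequisite) or ('CS 361' in prerequisite):
--             prerequisites[i] = ['Probability & Statistics']
--         elif 'MATH 415' in prerequisite:
--             prerequisites[i] = ['Linear Algebra']
--         elif 'CS 125' in prerequisite:
--             prerequisites[i] = ['Intro to CS I']
--         elif 'CS 126' in prerequisite:
--             prerequisites[i] = ['Intro to CS II']
--         elif ('CS 225' in prerequisite) or ('CS 173' in prerequisite):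
--             prerequisites[i] = ['Data Structures']
--         elif 'CS 446' in prerequisite:
--             prerequisites[i] = ['CS 446']
--         elif 'CS 374' in prerequisite:
--             prerequisites[i] = ['CS 374']
--         elif 'CS 446' in prerequisite:
--             prerequisites[i] = ['CS 446']
--         elif 'CS 475' in prerequisite:
--             prerequisites[i] = ['CS 475']
--         elif 'CS 473' in prerequisite:
--             prerequisites[i] = ['CS 473']
--         elif 'CS 461' in prerequisite:
--             prerequisites[i] = ['CS 461']
--         elif 'CS 463' in prerequisite:
--             prerequisites[i] = ['CS 463']
--         elif 'CS 450' in prerequisite: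
--             prerequisites[i] = ['CS 450']
--         elif 'CS 461' in prerequisite:
--             prerequisites[i] = ['CS 461']
--         elif 'MATH 461' in prerequisite:
--             prerequisites[i] = ['MATH 461']
--         elif 'CS 438' in prerequisite:
--             prerequisites[i] = ['CS 438']
--         elif 'CS 425' in prerequisite:
--             prerequisites[i] = ['CS 425']
--         elif 'CS 433' in prerequisite:
--             prerequisites[i] = ['CS 433']
--         elif 'CS 341' in prerequisite:
--             prerequisites[i] = ['CS 341']
--         elif 'CS 428' in prerequisite:
--             prerequisites[i] = ['CS 428']
--         elif 'CS 420' in prerequisite: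
--             prerequisites[i] = ['CS 420']
--         elif 'CS 423' in prerequisite:
--             prerequisites[i] = ['CS 423']
--         elif 'CS 233' in prerequisite:
--             prerequisites[i] = ['CS 233']
--         elif 'CS 427' in prerequisite:
--             prerequisites[i] = ['CS 427']
--         elif 'CS 128' in prerequisite:
--             prerequisites[i] = ['CS 128']
--         elif 'CS 418' in prerequisite:
--             prerequisites[i] = ['CS 418']
--         elif 'CS 314' in prerequisite:
--             prerequisites[i] = ['CS 314']
--
--     return prerequisites
-- ===== SOURCE B (Python) =====
-- # B: instead of scanning a fixed rule chain per sublist, scan the sublist's own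
-- # courses, look each up in a trigger->priority hash map built once, and keep the
-- # minimum priority found; the first-match rule priority equals the minimum index.
-- _RULE_TABLE = [
--     (['MATH 220'], 'Calculus I'),
--     (['STAT 400', 'CS 361'], 'Probability & Statistics'),
--     (['MATH 415'], 'Linear Algebra'),
--     (['CS 125'], 'Intro to CS I'),
--     (['CS 126'], 'Intro to CS II'),
--     (['CS 225', 'CS 173'], 'Data Structures'),
--     (['CS 446'], 'CS 446'),
--     (['CS 374'], 'CS 374'),
--     (['CS 475'], 'CS 475'),
--     (['CS 473'], 'CS 473'),
--     (['CS 461'], 'CS 461'),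
--     (['CS 463'], 'CS 463'),
--     (['CS 450'], 'CS 450'),
--     (['MATH 461'], 'MATH 461'),
--     (['CS 438'], 'CS 438'),
--     (['CS 425'], 'CS 425'),
--     (['CS 433'], 'CS 433'),
--     (['CS 341'], 'CS 341'),
--     (['CS 428'], 'CS 428'),
--     (['CS 420'], 'CS 420'),
--     (['CS 423'], 'CS 423'),
--     (['CS 233'], 'CS 233'),
--     (['CS 427'], 'CS 427'),
--     (['CS 128'], 'CS 128'),
--     (['CS 418'], 'CS 418'),
--     (['CS 314'], 'CS 314'),
-- ]
--
-- _PRIORITY = {}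
-- _REPLACEMENT = []
-- for _triggers, _name in _RULE_TABLE:
--     for _t in _triggers:
--         _PRIORITY[_t] = len(_REPLACEMENT)
--     _REPLACEMENT.append(_name)
--
--
-- def reduce_prerequisites_to_one_course(prerequisites):
--     for i, prerequisite in enumerate(prerequisites):
--         best = min((_PRIORITY[c] for c in prerequisite if c in _PRIORITY),
--                    default=None)
--         if best is not None:
--             prerequisites[i] = [_REPLACEMENT[best]]
--     return prerequisites
-- ===== Notes on version B (the rewrite author's own statement) =====
-- stated objective: faster
-- what changed: Instead of A's per-sublist scan through a fixed 27-branch if/elif chain of list-membership tests, B scans each sublist's own courses through a trigger-to-priority hash map built once and replaces by the rule of minimum priority found (first-match rule index = minimum triggered index).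
import Mathlib
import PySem

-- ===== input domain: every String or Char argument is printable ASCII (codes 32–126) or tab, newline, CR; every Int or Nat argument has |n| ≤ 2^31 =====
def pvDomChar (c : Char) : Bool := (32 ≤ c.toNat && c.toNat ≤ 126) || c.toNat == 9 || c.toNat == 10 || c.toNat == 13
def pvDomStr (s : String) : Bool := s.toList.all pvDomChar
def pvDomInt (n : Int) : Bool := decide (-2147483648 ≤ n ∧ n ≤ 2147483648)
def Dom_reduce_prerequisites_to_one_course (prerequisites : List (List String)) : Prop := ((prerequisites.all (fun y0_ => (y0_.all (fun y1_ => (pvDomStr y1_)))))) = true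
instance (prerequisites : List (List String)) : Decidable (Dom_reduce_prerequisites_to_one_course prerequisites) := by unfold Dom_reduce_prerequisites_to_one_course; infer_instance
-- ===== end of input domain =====

-- B replaces A's per-sublist scan of a fixed 27-branch if/elif chain by a single scan of the
-- sublist's own courses through a trigger→priority hash map, keeping the minimum priority
-- (alternative decomposition; the Python A mutates its argument in place, B performs the same
-- mutation — the equivalence proved here is about the RETURN value).

-- ===== PORT A =====
-- A's per-element if/elif chain, transliterated branch for branch (including the duplicated CS 446 / CS 461 branches).
def pvReduceOneA (p : List String) : List String :=
  if p.contains "MATH 220" then ["Calculus I"]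
  else if p.contains "STAT 400" || p.contains "CS 361" then ["Probability & Statistics"]
  else if p.contains "MATH 415" then ["Linear Algebra"]
  else if p.contains "CS 125" then ["Intro to CS I"]
  else if p.contains "CS 126" then ["Intro to CS II"]
  else if p.contains "CS 225" || p.contains "CS 173" then ["Data Structures"]
  else if p.contains "CS 446" then ["CS 446"]
  else if p.contains "CS 374" then ["CS 374"]
  else if p.contains "CS 446" then ["CS 446"]
  else if p.contains "CS 475" then ["CS 475"]
  else if p.contains "CS 473" then ["CS 473"]
  else if p.contains "CS 461" then ["CS 461"]
  else if p.contains "CS 463" then ["CS 463"]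
  else if p.contains "CS 450" then ["CS 450"]
  else if p.contains "CS 461" then ["CS 461"]
  else if p.contains "MATH 461" then ["MATH 461"]
  else if p.contains "CS 438" then ["CS 438"]
  else if p.contains "CS 425" then ["CS 425"]
  else if p.contains "CS 433" then ["CS 433"]
  else if p.contains "CS 341" then ["CS 341"]
  else if p.contains "CS 428" then ["CS 428"]
  else if p.contains "CS 420" then ["CS 420"]
  else if p.contains "CS 423" then ["CS 423"]
  else if p.contains "CS 233" then ["CS 233"]
  else if p.contains "CS 427" then ["CS 427"]
  else if p.contains "CS 128" then ["CS 128"]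
  else if p.contains "CS 418" then ["CS 418"]
  else if p.contains "CS 314" then ["CS 314"]
  else p

def reduce_prerequisites_to_one_course (prerequisites : List (List String)) : List (List String) :=
  prerequisites.map pvReduceOneA

-- ===== PORT B =====
-- _RULE_TABLE of Source B
def pvRules : List (List String × String) :=
  [ (["MATH 220"], "Calculus I"),
    (["STAT 400", "CS 361"], "Probability & Statistics"),
    (["MATH 415"], "Linear Algebra"),
    (["CS 125"], "Intro to CS I"),
    (["CS 126"], "Intro to CS II"),
    (["CS 225", "CS 173"], "Data Structures"),
    (["CS 446"], "CS 446"),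
    (["CS 374"], "CS 374"),
    (["CS 475"], "CS 475"),
    (["CS 473"], "CS 473"),
    (["CS 461"], "CS 461"),
    (["CS 463"], "CS 463"),
    (["CS 450"], "CS 450"),
    (["MATH 461"], "MATH 461"),
    (["CS 438"], "CS 438"),
    (["CS 425"], "CS 425"),
    (["CS 433"], "CS 433"),
    (["CS 341"], "CS 341"),
    (["CS 428"], "CS 428"),
    (["CS 420"], "CS 420"),
    (["CS 423"], "CS 423"),
    (["CS 233"], "CS 233"),
    (["CS 427"], "CS 427"),
    (["CS 128"], "CS 128"),
    (["CS 418"], "CS 418"),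
    (["CS 314"], "CS 314") ]

-- Source B's module-level loop building _PRIORITY (trigger course → rule index) and _REPLACEMENT
def pvTables : PySem.Dict String Nat × List String :=
  pvRules.foldl
    (fun pr r => (r.1.foldl (fun d t => d.insert t pr.2.length) pr.1, pr.2 ++ [r.2]))
    (PySem.Dict.empty, [])

def pvPriority : PySem.Dict String Nat := pvTables.1
def pvReplacement : List String := pvTables.2

-- one step of min((_PRIORITY[c] for c in prerequisite if c in _PRIORITY), default=None)
def pvStep (acc : Option Nat) (c : String) : Option Nat :=
  match pvPriority.get? c with
  | none => acc
  | some k => match acc with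
              | none => some k
              | some m => some (Nat.min m k)

def pvBest (p : List String) : Option Nat := p.foldl pvStep none

def reduce_prerequisites_to_one_course_alt (prerequisites : List (List String)) : List (List String) :=
  prerequisites.map (fun p =>
    match pvBest p with
    | none => p
    | some j => [pvReplacement.getD j ""])

-- ===== PRECONDITION & SPEC =====
def Spec_reduce_prerequisites_to_one_course (prerequisites : List (List String)) (out : List (List String)) : Prop := out = reduce_prerequisites_to_one_course_alt prerequisites
instance (prerequisites : List (List String)) (out : List (List String)) : Decidable (Spec_reduce_prerequisites_to_one_course prerequisites out) := by unfold Spec_reduce_prerequisites_to_one_course; infer_instance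

-- ===== CLAIM (what is proved, stated in full; the proofs are below) =====
def Claim_equal_reduce_prerequisites_to_one_course : Prop := ∀ (prerequisites : List (List String)), Dom_reduce_prerequisites_to_one_course prerequisites → Spec_reduce_prerequisites_to_one_course prerequisites (reduce_prerequisites_to_one_course prerequisites)

-- ===== LEMMAS AND PROOFS =====

-- proof-side helpers: does a rule fire on p, and first-match application of a rule table
def pvTrig (p : List String) (r : List String × String) : Bool := r.1.any (fun t => p.contains t)

def pvApplyRules (rules : List (List String × String)) (p : List String) : List String :=
  match rules with
  | [] => p
  | r :: rest => if pvTrig p r then [r.2] else pvApplyRules rest p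

def pvPrio (c : String) : Option Nat := pvPriority.get? c

-- A's chain is first-match over the rule table
set_option maxHeartbeats 2000000 in
theorem pvReduceOne_eq (p : List String) : pvReduceOneA p = pvApplyRules pvRules p := by
  simp only [pvReduceOneA, pvRules, pvApplyRules, pvTrig, List.any_cons, List.any_nil, Bool.or_false]
  generalize p.contains "CS 446" = b8
  generalize p.contains "CS 461" = b12
  cases b8 <;> cases b12 <;> simp

set_option maxHeartbeats 1000000 in
theorem pvPrio_some (c : String) (j : Nat) (h : pvPrio c = some j) :
    j < pvRules.length ∧ c ∈ (pvRules.getD j ([], "")).1 := by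
  have hck : c ∈ pvPriority.keys := by
    by_contra hnc
    rw [pvPrio, (PySem.Dict.get?_eq_none_iff_not_mem_keys pvPriority c).mpr hnc] at h
    simp at h
  rw [show pvPriority.keys =
      ["MATH 220", "STAT 400", "CS 361", "MATH 415", "CS 125", "CS 126", "CS 225", "CS 173",
       "CS 446", "CS 374", "CS 475", "CS 473", "CS 461", "CS 463", "CS 450", "MATH 461",
       "CS 438", "CS 425", "CS 433", "CS 341", "CS 428", "CS 420", "CS 423", "CS 233",
       "CS 427", "CS 128", "CS 418", "CS 314"] from by decide] at hck
  fin_cases hck <;> (cases h; decide)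

theorem pvPrio_of_mem (c : String) (j : Nat) (hj : j < pvRules.length)
    (hc : c ∈ (pvRules.getD j ([], "")).1) : pvPrio c = some j := by
  have hj' : j < 26 := by simpa [pvRules] using hj
  interval_cases j <;> fin_cases hc <;> decide

theorem memPrio (p : List String) (j : Nat) :
    j ∈ p.filterMap pvPrio ↔ (j < pvRules.length ∧ pvTrig p (pvRules.getD j ([], "")) = true) := by
  rw [List.mem_filterMap]
  constructor
  · rintro ⟨c, hcp, hpc⟩
    obtain ⟨hj, hmem⟩ := pvPrio_some c j hpc
    refine ⟨hj, ?_⟩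
    simp only [pvTrig, List.any_eq_true]
    exact ⟨c, hmem, by simpa using hcp⟩
  · rintro ⟨hj, htr⟩
    simp only [pvTrig, List.any_eq_true] at htr
    obtain ⟨t, htmem, htp⟩ := htr
    exact ⟨t, by simpa using htp, pvPrio_of_mem t j hj htmem⟩

theorem applyRules_min (rules : List (List String × String)) (p : List String) (m : List Nat)
    (hmem : ∀ j, j ∈ m ↔ (j < rules.length ∧ pvTrig p (rules.getD j ([], "")) = true)) :
    pvApplyRules rules p = (match m.min? with
      | none => p
      | some j => [(rules.map Prod.snd).getD j ""]) := by
  induction rules generalizing m with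
  | nil =>
    have hm : m = [] := by
      apply List.eq_nil_iff_forall_not_mem.mpr
      intro j hj
      have := (hmem j).1 hj
      simp at this
    subst hm
    simp [pvApplyRules]
  | cons r rest ih =>
    by_cases htr : pvTrig p r = true
    · have h0 : (0 : Nat) ∈ m := (hmem 0).2 ⟨by simp, by simpa using htr⟩
      have hmin : m.min? = some 0 :=
        List.min?_eq_some_iff.mpr ⟨h0, fun b _ => Nat.zero_le b⟩
      simp [pvApplyRules, htr, hmin]
    · have hLHS : pvApplyRules (r :: rest) p = pvApplyRules rest p := by
        simp [pvApplyRules, htr]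
      have hpos : ∀ b ∈ m, 1 ≤ b := by
        intro b hb
        rcases Nat.eq_zero_or_pos b with rfl | h
        · have := (hmem 0).1 hb
          simp at this
          exact absurd this htr
        · exact h
      have hmem' : ∀ j, j ∈ m.map (· - 1) ↔
          (j < rest.length ∧ pvTrig p (rest.getD j ([], "")) = true) := by
        intro j
        constructor
        · rintro hj
          obtain ⟨b, hb, rfl⟩ := List.mem_map.mp hj
          have hb1 := hpos b hb
          have := (hmem b).1 hb
          obtain ⟨b', rfl⟩ : ∃ b', b = b' + 1 := ⟨b - 1, by omega⟩
          simp only [List.length_cons, List.getD_cons_succ] at this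
          simpa using ⟨by omega, this.2⟩
        · rintro ⟨hj, htrj⟩
          have : j + 1 ∈ m := (hmem (j + 1)).2 ⟨by simpa using Nat.succ_lt_succ hj,
            by simpa [List.getD_cons_succ] using htrj⟩
          exact List.mem_map.mpr ⟨j + 1, this, by omega⟩
      rw [hLHS, ih (m.map (· - 1)) hmem']
      cases hm : m.min? with
      | none =>
        have : m = [] := List.min?_eq_none_iff.mp hm
        subst this
        simp
      | some a =>
        obtain ⟨ha, hle⟩ := List.min?_eq_some_iff.mp hm
        have ha1 : 1 ≤ a := hpos a ha
        have hmin' : (m.map (· - 1)).min? = some (a - 1) := by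
          apply List.min?_eq_some_iff.mpr
          refine ⟨List.mem_map.mpr ⟨a, ha, rfl⟩, ?_⟩
          rintro b' hb'
          obtain ⟨b, hb, rfl⟩ := List.mem_map.mp hb'
          exact Nat.sub_le_sub_right (hle b hb) 1
        rw [hmin']
        obtain ⟨a', rfl⟩ : ∃ a', a = a' + 1 := ⟨a - 1, by omega⟩
        simp

theorem foldBest_aux (l : List String) (acc : Option Nat) :
    l.foldl pvStep acc = (match acc, (l.filterMap pvPrio).min? with
      | none, r => r
      | some a, none => some a
      | some a, some b => some (Nat.min a b)) := by
  induction l generalizing acc with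
  | nil => cases acc <;> simp
  | cons c l ih =>
    rw [List.foldl_cons, ih]
    cases hpc : pvPrio c with
    | none =>
      have hstep : pvStep acc c = acc := by
        rw [pvStep]
        rw [pvPrio] at hpc
        rw [hpc]
      rw [hstep]
      simp [hpc]
    | some k =>
      have hstep : pvStep acc c = (match acc with
        | none => some k
        | some m => some (Nat.min m k)) := by
        rw [pvStep]
        rw [pvPrio] at hpc
        rw [hpc]
      rw [hstep]
      simp only [List.filterMap_cons, hpc]
      cases acc with
      | none =>
        cases hm : (l.filterMap pvPrio).min? with
        | none =>
          have : l.filterMap pvPrio = [] := List.min?_eq_none_iff.mp hm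
          simp [this]
        | some b =>
          rw [List.min?_cons, hm]
          simp [Option.elim]
      | some a =>
        cases hm : (l.filterMap pvPrio).min? with
        | none =>
          have : l.filterMap pvPrio = [] := List.min?_eq_none_iff.mp hm
          simp [this]
        | some b =>
          rw [List.min?_cons, hm]
          simp only [Option.elim]
          exact congrArg some (Nat.min_assoc a k b)

theorem pvReplacement_eq : pvReplacement = pvRules.map Prod.snd := by decide

theorem reduceOne_eq_alt (p : List String) :
    pvReduceOneA p = (match pvBest p with
      | none => p
      | some j => [pvReplacement.getD j ""]) := by
  have hb : pvBest p = (p.filterMap pvPrio).min? := by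
    rw [pvBest, foldBest_aux]
  rw [pvReduceOne_eq, applyRules_min pvRules p (p.filterMap pvPrio) (memPrio p), hb,
    pvReplacement_eq]

-- ===== VERDICT (by name: the statement is the Claim_ definition above) =====
theorem reduce_prerequisites_to_one_course_spec : Claim_equal_reduce_prerequisites_to_one_course := by
  intro prerequisites _
  unfold Spec_reduce_prerequisites_to_one_course reduce_prerequisites_to_one_course reduce_prerequisites_to_one_course_alt
  exact List.map_congr_left (fun p _ => reduceOne_eq_alt p)
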